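-- pv_equiv track=rewrite | github.com/paiml/depyler | examples/hard_trie_simple.py | unique_prefixes_count
-- ===== SOURCE A (Python) =====
-- def unique_prefixes_count(words: list[str], length: int) -> int:
--     """Count unique prefixes of given length."""
--     seen: list[str] = []
--     i: int = 0
--     while i < len(words):
--         word: str = words[i]
--         if len(word) >= length:
--             prefix: str = word[:length]
--             found: bool = False
--             j: int = 0
--             while j < len(seen):
--                 if seen[j] == prefix:
--                     found = True
--                     j = len(seen)
--                 else:
--                     j = j + 1
--             if not found:
--                 seen.append(prefix)
--         i = i + 1
--     return len(seen)
-- ===== SOURCE B (Python) =====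
-- def unique_prefixes_count(words: list[str], length: int) -> int:
--     """Count unique prefixes of given length: collect, sort, count adjacent-distinct."""
--     prefixes: list[str] = []
--     for word in words:
--         if len(word) >= length:
--             prefixes.append(word[:length])
--     prefixes.sort()
--     count: int = 0
--     prev = None
--     for p in prefixes:
--         if prev is None or p != prev:
--             count += 1
--         prev = p
--     return count
-- ===== Notes on version B (the rewrite author's own statement) =====
-- stated objective: alternative
-- what changed: Replaces A's membership scan over a growing 'seen' list by collect-all-prefixes, sort, then one pass counting adjacent-distinct entries.
import Mathlib
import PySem

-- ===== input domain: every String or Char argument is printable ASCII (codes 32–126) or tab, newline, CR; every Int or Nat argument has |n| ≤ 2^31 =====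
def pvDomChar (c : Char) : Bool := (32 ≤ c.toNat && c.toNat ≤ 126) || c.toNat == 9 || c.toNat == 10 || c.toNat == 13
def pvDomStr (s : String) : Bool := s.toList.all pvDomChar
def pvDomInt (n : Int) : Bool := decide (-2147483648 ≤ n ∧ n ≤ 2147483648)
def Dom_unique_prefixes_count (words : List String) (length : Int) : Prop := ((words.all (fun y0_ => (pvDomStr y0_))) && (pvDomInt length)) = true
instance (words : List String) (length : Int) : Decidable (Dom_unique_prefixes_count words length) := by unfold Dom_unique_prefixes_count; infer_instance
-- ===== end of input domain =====

-- B replaces A's quadratic membership scan by collect-prefixes, sort, count adjacent-distinct.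


-- ===== PORT A =====
-- inner 'while j < len(seen)' scan of A (the 'j = len(seen)' assignment is the break)
def pvAScan (seen : List String) (pfx : String) : Bool :=
  match seen with
  | [] => false
  | s :: rest => if s = pfx then true else pvAScan rest pfx

def unique_prefixes_count (words : List String) (length : Int) : Int :=
  let seen := words.foldl (fun seen word =>
    if length ≤ PySem.Str.len word then
      -- prefix = word[:length]; inlined (same expression in the test and the append)
      if pvAScan seen (PySem.Str.slice word none (some length)) then seen
      else seen ++ [PySem.Str.slice word none (some length)]
    else seen) []
  PySem.List.len seen

-- ===== PORT B =====
def unique_prefixes_count_alt (words : List String) (length : Int) : Int :=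
  let prefixes := words.foldl (fun acc word =>
    if length ≤ PySem.Str.len word then
      acc ++ [PySem.Str.slice word none (some length)]
    else acc) []
  let sortedP := PySem.List.sorted prefixes (fun x => x) false
  (sortedP.foldl (fun (st : Int × Option String) p =>
    (if st.2 = some p then st.1 else st.1 + 1, some p)) (0, none)).1

-- ===== PRECONDITION & SPEC =====
def Spec_unique_prefixes_count (words : List String) (length : Int) (out : Int) : Prop := out = unique_prefixes_count_alt words length
instance (words : List String) (length : Int) (out : Int) : Decidable (Spec_unique_prefixes_count words length out) := by unfold Spec_unique_prefixes_count; infer_instance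

-- ===== CLAIM (what is proved, stated in full; the proofs are below) =====
def Claim_equal_unique_prefixes_count : Prop := ∀ (words : List String) (length : Int), Dom_unique_prefixes_count words length → Spec_unique_prefixes_count words length (unique_prefixes_count words length)

-- ===== LEMMAS AND PROOFS =====

-- the list of kept prefixes, in words order
def pvP (words : List String) (length : Int) : List String :=
  (words.filter (fun w => decide (length ≤ PySem.Str.len w))).map
    (fun w => PySem.Str.slice w none (some length))

lemma pvAScan_iff (seen : List String) (pfx : String) :
    pvAScan seen pfx = true ↔ pfx ∈ seen := by
  induction seen with
  | nil => simp [pvAScan]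
  | cons s rest ih =>
      by_cases h : s = pfx
      · subst h; simp [pvAScan]
      · simp only [pvAScan, if_neg h, ih, List.mem_cons]
        constructor
        · exact Or.inr
        · rintro (rfl | hm)
          · exact absurd rfl h
          · exact hm

lemma pvP_cons_pos (length : Int) (w : String) (ws : List String)
    (h : length ≤ PySem.Str.len w) :
    pvP (w :: ws) length = PySem.Str.slice w none (some length) :: pvP ws length := by
  have h2 : length ≤ ((w.length : Int)) := by simpa using h
  simp [pvP, h2]

lemma pvP_cons_neg (length : Int) (w : String) (ws : List String)
    (h : ¬ length ≤ PySem.Str.len w) :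
    pvP (w :: ws) length = pvP ws length := by
  have h2 : ¬ length ≤ ((w.length : Int)) := by simpa using h
  simp [pvP, h2]

lemma pvB_build (length : Int) (ws : List String) (acc : List String) :
    ws.foldl (fun acc word =>
      if length ≤ PySem.Str.len word then
        acc ++ [PySem.Str.slice word none (some length)]
      else acc) acc = acc ++ pvP ws length := by
  induction ws generalizing acc with
  | nil => simp [pvP]
  | cons w ws ih =>
      by_cases h : length ≤ PySem.Str.len w
      · rw [List.foldl_cons, if_pos h, ih, pvP_cons_pos length w ws h]
        simp
      · rw [List.foldl_cons, if_neg h, ih, pvP_cons_neg length w ws h]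

lemma pvA_len (length : Int) (ws : List String) (seen : List String) (hnd : seen.Nodup) :
    (ws.foldl (fun seen word =>
      if length ≤ PySem.Str.len word then
        if pvAScan seen (PySem.Str.slice word none (some length)) then seen
        else seen ++ [PySem.Str.slice word none (some length)]
      else seen) seen).length = (seen.toFinset ∪ (pvP ws length).toFinset).card := by
  induction ws generalizing seen with
  | nil => simp [pvP, List.toFinset_card_of_nodup hnd]
  | cons w ws ih =>
      by_cases h : length ≤ PySem.Str.len w
      · by_cases hs : pvAScan seen (PySem.Str.slice w none (some length)) = true
        · have hmem : PySem.Str.slice w none (some length) ∈ seen := (pvAScan_iff _ _).mp hs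
          simp only [List.foldl_cons, if_pos h, hs, if_true]
          rw [ih seen hnd, pvP_cons_pos length w ws h]
          congr 1
          rw [List.toFinset_cons, Finset.union_insert, Finset.insert_eq_self.mpr]
          exact Finset.mem_union_left _ (List.mem_toFinset.mpr hmem)
        · have hnmem : PySem.Str.slice w none (some length) ∉ seen :=
            fun hm => hs ((pvAScan_iff _ _).mpr hm)
          have hnd' : (seen ++ [PySem.Str.slice w none (some length)]).Nodup :=
            List.Nodup.append hnd (List.nodup_singleton _) (by simpa using hnmem)
          simp only [List.foldl_cons, if_pos h, hs, if_false, Bool.false_eq_true]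
          rw [ih _ hnd', pvP_cons_pos length w ws h]
          congr 1
          rw [List.toFinset_append, List.toFinset_cons]
          ext x
          simp only [Finset.mem_union, Finset.mem_insert, List.toFinset_cons,
            List.toFinset_nil, Finset.mem_insert, Finset.notMem_empty, or_false,
            List.mem_toFinset]
          tauto
      · simp only [List.foldl_cons, if_neg h]
        rw [ih seen hnd, pvP_cons_neg length w ws h]

lemma pvInsert_card {p : String} (t : Finset String) :
    (insert p t).card = (t.erase p).card + 1 := by
  have h1 : insert p (t.erase p) = insert p t := by
    ext x; by_cases hx : x = p <;> simp [hx]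
  rw [← h1, Finset.card_insert_of_notMem (Finset.notMem_erase p t)]

lemma pvB_count_go (s : List String) (c : Int) (q : String)
    (hp : s.Pairwise (· ≤ ·)) (hq : ∀ x ∈ s, q ≤ x) :
    (s.foldl (fun (st : Int × Option String) p =>
      (if st.2 = some p then st.1 else st.1 + 1, some p)) (c, some q)).1
    = c + ((s.toFinset).erase q).card := by
  induction s generalizing c q with
  | nil => simp
  | cons p rest ih =>
      have hp' := (List.pairwise_cons.mp hp).2
      have hhead := (List.pairwise_cons.mp hp).1
      by_cases hpq : q = p
      · subst hpq
        have e : (List.foldl (fun (st : Int × Option String) p =>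
              (if st.2 = some p then st.1 else st.1 + 1, some p)) (c, some q) (q :: rest))
            = (List.foldl (fun (st : Int × Option String) p =>
              (if st.2 = some p then st.1 else st.1 + 1, some p)) (c, some q) rest) := by
          rw [List.foldl_cons]; simp
        rw [e, ih c q hp' hhead]
        have he : (q :: rest).toFinset.erase q = rest.toFinset.erase q := by
          rw [List.toFinset_cons]
          ext x; by_cases hx : x = q <;> simp [hx]
        rw [he]
      · have hlt : q < p := lt_of_le_of_ne (hq p (by simp)) hpq
        have hqrest : q ∉ (insert p rest.toFinset) := by
          simp only [Finset.mem_insert, List.mem_toFinset]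
          rintro (rfl | hx)
          · exact absurd rfl (ne_of_lt hlt)
          · exact absurd rfl (ne_of_lt (lt_of_lt_of_le hlt (hhead _ hx)))
        have e : (List.foldl (fun (st : Int × Option String) p =>
              (if st.2 = some p then st.1 else st.1 + 1, some p)) (c, some q) (p :: rest))
            = (List.foldl (fun (st : Int × Option String) p =>
              (if st.2 = some p then st.1 else st.1 + 1, some p)) (c + 1, some p) rest) := by
          rw [List.foldl_cons]; simp [hpq]
        rw [e, ih (c + 1) p hp' hhead]
        rw [List.toFinset_cons, Finset.erase_eq_of_notMem hqrest, pvInsert_card]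
        push_cast; ring

lemma pvB_count (s : List String) (hp : s.Pairwise (· ≤ ·)) :
    (s.foldl (fun (st : Int × Option String) p =>
      (if st.2 = some p then st.1 else st.1 + 1, some p)) ((0 : Int), (none : Option String))).1
    = s.toFinset.card := by
  cases s with
  | nil => simp
  | cons p rest =>
      have hp' := (List.pairwise_cons.mp hp).2
      have hhead := (List.pairwise_cons.mp hp).1
      have e : (List.foldl (fun (st : Int × Option String) p =>
            (if st.2 = some p then st.1 else st.1 + 1, some p)) ((0 : Int), (none : Option String)) (p :: rest))
          = (List.foldl (fun (st : Int × Option String) p =>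
            (if st.2 = some p then st.1 else st.1 + 1, some p)) ((0 : Int) + 1, some p) rest) := by
        rw [List.foldl_cons]; simp
      rw [e, pvB_count_go rest (0 + 1) p hp' hhead, List.toFinset_cons, pvInsert_card]
      push_cast; ring

lemma pv_main (words : List String) (length : Int) :
    unique_prefixes_count words length = unique_prefixes_count_alt words length := by
  unfold unique_prefixes_count unique_prefixes_count_alt
  rw [pvB_build length words []]
  simp only [List.nil_append]
  have hperm : (PySem.List.sorted (pvP words length) (fun x => x) false).Perm (pvP words length) :=
    PySem.List.sorted_perm _ _ _
  have hpair : (PySem.List.sorted (pvP words length) (fun x => x) false).Pairwise (· ≤ ·) := by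
    have := PySem.List.sorted_pairwise (xs := pvP words length) (key := fun x => x)
    simpa using this
  rw [pvB_count _ hpair, List.toFinset_eq_of_perm _ _ hperm]
  have hA := pvA_len length words [] List.nodup_nil
  simp only [List.toFinset_nil, Finset.empty_union] at hA
  simp only [PySem.List.len, hA]

-- ===== VERDICT (by name: the statement is the Claim_ definition above) =====
theorem unique_prefixes_count_spec : Claim_equal_unique_prefixes_count := by
  intro words length _
  unfold Spec_unique_prefixes_count
  exact pv_main words length
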